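-- pv_equiv track=rewrite | github.com/Abdullaaurad/python | Hackerrank/order.py | calculate_earned_money
-- ===== SOURCE A (Python) =====
-- from collections import Counter
--
-- def calculate_earned_money(shoe_sizes, customers):
--     shoe_inventory = Counter(shoe_sizes)
--     total_earned = 0
--
--     for customer in customers:
--         size, price = customer
--         if shoe_inventory[size] > 0:
--             total_earned += price
--             shoe_inventory[size] -= 1
--
--     return total_earned
-- ===== SOURCE B (Python) =====
-- from collections import Counter
--
-- def calculate_earned_money(shoe_sizes, customers):
--     stock = Counter(shoe_sizes)
--     by_size = {}
--     for customer in customers: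
--         size, price = customer
--         by_size.setdefault(size, []).append(price)
--     total = 0
--     for size, prices in by_size.items():
--         total += sum(prices[:stock[size]])
--     return total
-- ===== Notes on version B (the rewrite author's own statement) =====
-- stated objective: alternative
-- what changed: Replaces A's single interleaved loop with a live decrementing inventory by a group-then-sum decomposition: build a dict of per-size price lists and a stock Counter, then sum the first stock[size] prices of each group.
import Mathlib
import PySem

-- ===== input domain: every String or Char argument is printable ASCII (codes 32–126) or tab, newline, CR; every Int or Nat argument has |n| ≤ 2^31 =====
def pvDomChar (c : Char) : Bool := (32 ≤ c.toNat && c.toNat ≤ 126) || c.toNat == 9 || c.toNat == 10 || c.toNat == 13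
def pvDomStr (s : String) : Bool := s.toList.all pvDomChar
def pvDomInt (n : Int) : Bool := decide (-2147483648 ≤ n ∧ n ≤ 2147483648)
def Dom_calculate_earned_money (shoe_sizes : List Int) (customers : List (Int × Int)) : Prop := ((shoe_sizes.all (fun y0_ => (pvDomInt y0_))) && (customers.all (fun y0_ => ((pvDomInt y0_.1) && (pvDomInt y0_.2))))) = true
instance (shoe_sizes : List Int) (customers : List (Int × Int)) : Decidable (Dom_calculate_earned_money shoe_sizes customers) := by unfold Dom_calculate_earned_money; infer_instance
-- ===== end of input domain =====

-- B replaces A's single loop with live inventory decrements by a group-then-sum decomposition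
-- (group prices by size, count stock once, take the first stock-many prices per size); objective: alternative.


-- ===== PORT A =====
-- state = (shoe_inventory, total_earned); 'shoe_inventory[size] -= 1' is modify with default 0
def calculate_earned_money (shoe_sizes : List Int) (customers : List (Int × Int)) : Int :=
  let shoe_inventory : PySem.Dict Int Int := PySem.Dict.counter shoe_sizes
  (customers.foldl
    (fun (st : PySem.Dict Int Int × Int) customer =>
      if st.1.getD customer.1 0 > 0 then
        (st.1.modify customer.1 0 (· - 1), st.2 + customer.2)
      else st)
    (shoe_inventory, 0)).2

-- ===== PORT B =====
-- stock[size] is a count, hence ≥ 0, so the Python slice prices[:stock[size]] is List.take of its toNat (exact here)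
def calculate_earned_money_alt (shoe_sizes : List Int) (customers : List (Int × Int)) : Int :=
  let stock : PySem.Dict Int Int := PySem.Dict.counter shoe_sizes
  let by_size : PySem.Dict Int (List Int) :=
    customers.foldl (fun d customer => d.modify customer.1 [] (· ++ [customer.2])) PySem.Dict.empty
  by_size.items.foldl
    (fun total it => total + (it.2.take (stock.getD it.1 0).toNat).sum) 0

-- ===== PRECONDITION & SPEC =====
def Spec_calculate_earned_money (shoe_sizes : List Int) (customers : List (Int × Int)) (out : Int) : Prop := out = calculate_earned_money_alt shoe_sizes customers
instance (shoe_sizes : List Int) (customers : List (Int × Int)) (out : Int) : Decidable (Spec_calculate_earned_money shoe_sizes customers out) := by unfold Spec_calculate_earned_money; infer_instance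

-- ===== CLAIM (what is proved, stated in full; the proofs are below) =====
def Claim_equal_calculate_earned_money : Prop := ∀ (shoe_sizes : List Int) (customers : List (Int × Int)), Dom_calculate_earned_money shoe_sizes customers → Spec_calculate_earned_money shoe_sizes customers (calculate_earned_money shoe_sizes customers)

-- ===== LEMMAS AND PROOFS =====

-- the prices requested for size s, in arrival order
def pricesOf (s : Int) (cs : List (Int × Int)) : List Int :=
  (cs.filter (fun p => p.1 == s)).map (·.2)

theorem pricesOf_cons (s : Int) (c : Int × Int) (cs : List (Int × Int)) :
    pricesOf s (c :: cs) = if c.1 = s then c.2 :: pricesOf s cs else pricesOf s cs := by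
  by_cases h : c.1 = s <;> simp [pricesOf, h]

theorem pricesOf_eq_nil_of_not_mem (s : Int) (cs : List (Int × Int))
    (h : s ∉ cs.map Prod.fst) : pricesOf s cs = [] := by
  simp only [pricesOf, List.map_eq_nil_iff, List.filter_eq_nil_iff]
  intro p hp hps
  exact h (List.mem_map.mpr ⟨p, hp, by simpa using hps⟩)

-- invariant of A's loop: the running total grows by, per distinct requested size,
-- the sum of the first (current inventory) prices requested for it
theorem loopA (cs : List (Int × Int)) (inv : PySem.Dict Int Int) (total : Int) :
    (cs.foldl
      (fun (st : PySem.Dict Int Int × Int) customer =>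
        if st.1.getD customer.1 0 > 0 then
          (st.1.modify customer.1 0 (· - 1), st.2 + customer.2)
        else st)
      (inv, total)).2
    = total + ∑ s ∈ (cs.map Prod.fst).toFinset,
        ((pricesOf s cs).take (inv.getD s 0).toNat).sum := by
  induction cs generalizing inv total with
  | nil => simp
  | cons c rest ih =>
    obtain ⟨s, p⟩ := c
    simp only [List.foldl_cons, List.map_cons, List.toFinset_cons]
    by_cases h : inv.getD s 0 > 0
    · rw [if_pos h, ih]
      have htn : (inv.getD s 0).toNat = ((inv.getD s 0 - 1).toNat) + 1 := by omega
      have hterm : ((pricesOf s ((s, p) :: rest)).take (inv.getD s 0).toNat).sum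
          = p + ((pricesOf s rest).take (((inv.modify s 0 (· - 1)).getD s 0)).toNat).sum := by
        rw [pricesOf_cons, if_pos rfl, PySem.Dict.getD_modify_self, htn,
            List.take_succ_cons, List.sum_cons]
      have hrest : ∀ t, t ≠ s →
          ((pricesOf t ((s, p) :: rest)).take ((inv.getD t 0)).toNat).sum
          = ((pricesOf t rest).take (((inv.modify s 0 (· - 1)).getD t 0)).toNat).sum := by
        intro t hts
        rw [pricesOf_cons, if_neg (fun he => hts (by simpa using he.symm)),
            PySem.Dict.getD_modify_of_ne _ _ _ hts]
      by_cases hs : s ∈ (rest.map Prod.fst).toFinset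
      · rw [Finset.insert_eq_self.mpr hs,
            ← Finset.add_sum_erase _ _ hs, ← Finset.add_sum_erase _ _ hs, hterm,
            Finset.sum_congr rfl (fun t ht => hrest t (Finset.mem_erase.mp ht).1)]
        ring
      · have hnil : pricesOf s rest = [] :=
          pricesOf_eq_nil_of_not_mem s rest (by simpa using hs)
        rw [Finset.sum_insert hs, hterm, hnil,
            Finset.sum_congr rfl (fun t ht => hrest t (fun he => hs (he ▸ ht)))]
        simp
        ring
    · rw [if_neg h, ih]
      have htn : (inv.getD s 0).toNat = 0 := by omega
      have hrest : ∀ t, t ≠ s →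
          ((pricesOf t ((s, p) :: rest)).take ((inv.getD t 0)).toNat).sum
          = ((pricesOf t rest).take ((inv.getD t 0)).toNat).sum := by
        intro t hts
        rw [pricesOf_cons, if_neg (fun he => hts (by simpa using he.symm))]
      by_cases hs : s ∈ (rest.map Prod.fst).toFinset
      · rw [Finset.insert_eq_self.mpr hs,
            ← Finset.add_sum_erase _ _ hs, ← Finset.add_sum_erase _ _ hs,
            Finset.sum_congr rfl (fun t ht => hrest t (Finset.mem_erase.mp ht).1)]
        simp [htn]
      · rw [Finset.sum_insert hs,
            Finset.sum_congr rfl (fun t ht => hrest t (fun he => hs (he ▸ ht)))]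
        simp [htn]

-- B's grouping dict, characterised
theorem loopB (shoe_sizes : List Int) (cs : List (Int × Int)) :
    calculate_earned_money_alt shoe_sizes cs
    = ∑ s ∈ (cs.map Prod.fst).toFinset,
        ((pricesOf s cs).take ((PySem.Dict.counter shoe_sizes).getD s 0).toNat).sum := by
  unfold calculate_earned_money_alt
  simp only
  set stock := PySem.Dict.counter shoe_sizes with hstock
  set by_size : PySem.Dict Int (List Int) :=
    cs.foldl (fun d customer => d.modify customer.1 [] (· ++ [customer.2])) PySem.Dict.empty
    with hby
  have hnodup : by_size.keys.Nodup := by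
    rw [hby]
    exact PySem.Dict.nodup_keys_foldl_modify_key cs Prod.fst [] _ _ PySem.Dict.nodup_keys_empty
  have hkeys : by_size.keys = PySem.Set.ofList (cs.map Prod.fst) := by
    rw [hby]
    rw [PySem.Dict.keys_foldl_modify_key]
    simp [PySem.Set.update, PySem.Set.ofList_eq_foldl]
  have hitems : by_size.items = by_size.keys.map (fun k => (k, by_size.getD k [])) :=
    PySem.Dict.items_eq_map_keys by_size hnodup []
  rw [PySem.List.foldl_add by_size.items (fun it => ((it.2.take (stock.getD it.1 0).toNat).sum)) 0, hitems]
  have hval : ∀ k, by_size.getD k [] = pricesOf k cs := by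
    intro k
    rw [hby, PySem.Dict.getD_foldl_modify_append]
    simp [pricesOf, PySem.Dict.getD_empty]
  have hfs : by_size.keys.toFinset = (cs.map Prod.fst).toFinset := by
    apply Finset.ext
    intro a
    simp [hkeys, List.mem_toFinset, PySem.Set.mem_ofList]
  simp only [List.map_map, Function.comp_def]
  rw [← List.sum_toFinset _ hnodup, hfs,
      Finset.sum_congr rfl (fun k _ => by rw [hval])]
  simp

-- ===== VERDICT (by name: the statement is the Claim_ definition above) =====
theorem calculate_earned_money_spec : Claim_equal_calculate_earned_money := by
  intro shoe_sizes customers _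
  unfold Spec_calculate_earned_money
  unfold calculate_earned_money
  rw [loopA, loopB]
  simp
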